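-- pv_equiv track=rewrite | github.com/goodwordalchemy/coding_competitions | kickstartG2021/staying_hydrated2.py | line_sweep_for_optimal_coordinate
-- ===== SOURCE A (Python) =====
-- START = 1
--
-- def line_sweep_for_optimal_coordinate(coords):
--     """
--     let a(x) = number of right sides of objects x is to the right of.
--     let b(x) = number of left sides of objects x is to the left of.
--     """
--     assert len(coords) % 2 == 0
--
--     a = len(coords) // 2
--     b = 0
--
--     for c, side, _ in coords:
--         if side == START:
--             b += 1
--         else:
--             a -= 1
--
--         if a <= b:
--             return c
-- ===== SOURCE B (Python) =====
-- def line_sweep_for_optimal_coordinate(coords):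
--     assert len(coords) % 2 == 0
--     if not coords:
--         return None
--     return coords[len(coords) // 2 - 1][0]
-- ===== Notes on version B (the rewrite author's own statement) =====
-- stated objective: faster
-- what changed: The sweep's stop condition a<=b first holds exactly after len(coords)//2 events regardless of sides, so B returns coords[len(coords)//2 - 1][0] by a closed-form index instead of running the line sweep.
-- outside the precondition, e.g. on line_sweep_for_optimal_coordinate([]): A returns None, B returns None
import Mathlib
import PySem

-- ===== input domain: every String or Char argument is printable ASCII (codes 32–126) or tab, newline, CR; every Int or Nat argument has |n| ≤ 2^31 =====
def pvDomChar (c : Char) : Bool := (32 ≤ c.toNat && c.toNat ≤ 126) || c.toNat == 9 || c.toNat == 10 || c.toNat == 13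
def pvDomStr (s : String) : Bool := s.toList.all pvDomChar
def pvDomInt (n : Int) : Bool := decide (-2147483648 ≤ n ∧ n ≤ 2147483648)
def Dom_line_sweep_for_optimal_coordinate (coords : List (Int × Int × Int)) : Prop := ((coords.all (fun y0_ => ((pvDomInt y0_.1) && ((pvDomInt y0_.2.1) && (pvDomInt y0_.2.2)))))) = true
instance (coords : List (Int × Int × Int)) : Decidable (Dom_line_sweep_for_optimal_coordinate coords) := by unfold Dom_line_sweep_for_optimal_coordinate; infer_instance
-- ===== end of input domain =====

-- ===== PORT A =====
-- B replaces A's line sweep by a closed-form index (the sweep stops exactly after len//2 events); proved equal on nonempty even-length inputs.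
-- A's for-loop with an early return, as a structural recursion over the same state (a, b); none = fell off the loop (Python returns None).
def lsSweepA : List (Int × Int × Int) → Int → Int → Option Int
  | [], _, _ => none
  | (c, side, _) :: rest, a, b =>
    if side == 1 then
      if a ≤ b + 1 then some c else lsSweepA rest a (b + 1)
    else
      if a - 1 ≤ b then some c else lsSweepA rest (a - 1) b

def line_sweep_for_optimal_coordinate (coords : List (Int × Int × Int)) : Int :=
  (lsSweepA coords (PySem.Int.floordiv coords.length 2) 0).getD 0

-- ===== PORT B =====
def line_sweep_for_optimal_coordinate_alt (coords : List (Int × Int × Int)) : Int :=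
  match PySem.List.pyGet? coords (PySem.Int.floordiv coords.length 2 - 1) with
  | some (c, _, _) => c
  | none => 0

-- ===== PRECONDITION & SPEC =====
-- Pre_ excludes odd-length lists (A's assert raises AssertionError) and the empty list (A falls
-- off the loop and returns None, which is not a value of type Int; B returns None there too).
def Pre_line_sweep_for_optimal_coordinate (coords : List (Int × Int × Int)) : Prop :=
  coords ≠ [] ∧ coords.length % 2 = 0
instance (coords : List (Int × Int × Int)) : Decidable (Pre_line_sweep_for_optimal_coordinate coords) := by unfold Pre_line_sweep_for_optimal_coordinate; infer_instance
def pvWitness_line_sweep_for_optimal_coordinate : (List (Int × Int × Int)) := [(3, 1, 0), (5, 0, 0)]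
def Spec_line_sweep_for_optimal_coordinate (coords : List (Int × Int × Int)) (out : Int) : Prop := out = line_sweep_for_optimal_coordinate_alt coords
instance (coords : List (Int × Int × Int)) (out : Int) : Decidable (Spec_line_sweep_for_optimal_coordinate coords out) := by unfold Spec_line_sweep_for_optimal_coordinate; infer_instance

-- ===== CLAIM (what is proved, stated in full; the proofs are below) =====
def Claim_equal_line_sweep_for_optimal_coordinate : Prop := ∀ (coords : List (Int × Int × Int)), Dom_line_sweep_for_optimal_coordinate coords → Pre_line_sweep_for_optimal_coordinate coords → Spec_line_sweep_for_optimal_coordinate coords (line_sweep_for_optimal_coordinate coords)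

-- ===== LEMMAS AND PROOFS =====
-- Each event decrements a - b by 1 (either b rises or a falls), so the sweep returns the
-- coordinate of event number (a - b) counted from 1, i.e. index (a - b) - 1.
theorem lsSweepA_eq_getElem : ∀ (l : List (Int × Int × Int)) (k : Nat) (a b : Int),
    a - b = (k : Int) + 1 → k + 1 ≤ l.length →
    lsSweepA l a b = (l[k]?).map (fun t => t.1) := by
  intro l
  induction l with
  | nil => intro k a b _ hlen; simp at hlen
  | cons hd tl ih =>
    intro k a b hab hlen
    obtain ⟨c, side, z⟩ := hd
    cases k with
    | zero =>
      have h1 : a - b = 1 := by omega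
      simp only [lsSweepA]
      by_cases hs : side == 1
      · simp [hs, show a ≤ b + 1 by omega]
      · simp [hs, show a - 1 ≤ b by omega]
    | succ k' =>
      simp only [lsSweepA]
      have hrec₁ : lsSweepA tl a (b + 1) = (tl[k']?).map (fun t => t.1) := by
        apply ih; omega; simpa using Nat.le_of_succ_le_succ hlen
      have hrec₂ : lsSweepA tl (a - 1) b = (tl[k']?).map (fun t => t.1) := by
        apply ih; omega; simpa using Nat.le_of_succ_le_succ hlen
      by_cases hs : side == 1
      · simp [hs, show ¬ (a ≤ b + 1) by omega, hrec₁]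
      · simp [hs, show ¬ (a - 1 ≤ b) by omega, hrec₂]

theorem floordiv_two_natCast (n : Nat) : PySem.Int.floordiv (n : Int) 2 = ((n / 2 : Nat) : Int) := by
  simp [PySem.Int.floordiv, Int.fdiv_eq_ediv]

-- ===== VERDICT (by name: the statement is the Claim_ definition above) =====
theorem line_sweep_for_optimal_coordinate_spec : Claim_equal_line_sweep_for_optimal_coordinate := by
  intro coords _ hpre
  obtain ⟨hne, heven⟩ := hpre
  have hlen : 2 ≤ coords.length := by
    cases coords with
    | nil => exact absurd rfl hne
    | cons x xs => cases xs with
      | nil => simp at heven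
      | cons y ys => simp
  have hk : coords.length / 2 - 1 + 1 ≤ coords.length := by omega
  unfold Spec_line_sweep_for_optimal_coordinate line_sweep_for_optimal_coordinate line_sweep_for_optimal_coordinate_alt
  rw [floordiv_two_natCast]
  set k : Nat := coords.length / 2 - 1 with hkdef
  have hA : lsSweepA coords ((coords.length / 2 : Nat) : Int) 0 = (coords[k]?).map (fun t => t.1) := by
    apply lsSweepA_eq_getElem coords k _ 0 (by omega) hk
  have hidx : ((coords.length / 2 : Nat) : Int) - 1 = (k : Int) := by omega
  rw [hA, hidx, PySem.List.pyGet?_natCast]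
  have hget : coords[k]? = some coords[k] := List.getElem?_eq_getElem (by omega)
  rw [hget]
  obtain ⟨c, s, z⟩ := coords[k]
  rfl
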